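-- pv_equiv track=rewrite | github.com/phumipatc/CU_Submissions | ComProg/09_MoreDC/09_NestedList_34_Fill_In_Number.py | pattern5
-- ===== SOURCE A (Python) =====
-- def pattern5(N):
--     ret = [[0]*N for i in range(N)]
--     cnt = 1
--     st = 0
--     for x in range(N):
--         i = 0
--         j = st
--         st += 1
--         while i < N and j < N:
--             ret[i][j] = cnt
--             cnt += 1
--             i += 1
--             j += 1
--     return ret
-- ===== SOURCE B (Python) =====
-- def pattern5(N):
--     def val(i, j):
--         d = j - i
--         if d < 0:
--             return 0
--         return 1 + d * N - d * (d - 1) // 2 + i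
--
--     return [[val(i, j) for j in range(N)] for i in range(N)]
-- ===== Notes on version B (the rewrite author's own statement) =====
-- stated objective: simpler
-- what changed: B computes each cell independently from its coordinates via the closed-form diagonal formula 1 + d*N - d*(d-1)//2 + i (d = j - i), replacing A's sequential counter threaded along successive diagonals with in-place assignments.
import Mathlib
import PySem

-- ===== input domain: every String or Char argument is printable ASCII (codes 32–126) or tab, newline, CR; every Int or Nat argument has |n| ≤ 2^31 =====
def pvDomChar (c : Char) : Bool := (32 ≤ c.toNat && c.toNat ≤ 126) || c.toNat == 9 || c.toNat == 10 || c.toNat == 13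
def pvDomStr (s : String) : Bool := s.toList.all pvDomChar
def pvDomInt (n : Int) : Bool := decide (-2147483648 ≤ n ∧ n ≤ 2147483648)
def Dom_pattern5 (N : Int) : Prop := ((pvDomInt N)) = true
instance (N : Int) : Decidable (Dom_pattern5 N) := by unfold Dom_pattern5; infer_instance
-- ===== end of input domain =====

-- B computes each cell independently by the closed-form diagonal formula instead of
-- threading a running counter along successive diagonals; objective: simpler.

-- ===== PORT A =====
-- the while loop: while i < N and j < N: ret[i][j] = cnt; cnt += 1; i += 1; j += 1
-- (ret[i][j] = cnt ported with PySem.List.pySetD/pyGetD, exact for the in-range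
-- nonnegative indices A uses)
def pattern5_inner (N : Int) (i j cnt : Int) (ret : List (List Int)) : List (List Int) × Int :=
  if h : i < N ∧ j < N then
    pattern5_inner N (i + 1) (j + 1) (cnt + 1)
      (PySem.List.pySetD ret i (PySem.List.pySetD (PySem.List.pyGetD ret i []) j cnt))
  else (ret, cnt)
termination_by (N - i).toNat
decreasing_by omega


-- ret = [[0]*N for i in range(N)]; [0]*N is [] for N <= 0, exactly List.replicate N.toNat 0
def pattern5 (N : Int) : List (List Int) :=
  let ret0 := (PySem.List.pyRange 0 N 1).map (fun _ => List.replicate N.toNat (0 : Int))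
  let s := (PySem.List.pyRange 0 N 1).foldl
    (fun (acc : List (List Int) × Int × Int) _ =>
      let ret := acc.1
      let cnt := acc.2.1
      let st := acc.2.2
      let p := pattern5_inner N 0 st cnt ret
      (p.1, p.2, st + 1))
    (ret0, 1, 0)
  s.1


-- ===== PORT B =====
def pattern5_alt (N : Int) : List (List Int) :=
  (PySem.List.pyRange 0 N 1).map (fun i =>
    (PySem.List.pyRange 0 N 1).map (fun j =>
      let d := j - i
      if d < 0 then 0
      else 1 + d * N - PySem.Int.floordiv (d * (d - 1)) 2 + i))


-- ===== PRECONDITION & SPEC =====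
def Spec_pattern5 (N : Int) (out : List (List Int)) : Prop := out = pattern5_alt N
instance (N : Int) (out : List (List Int)) : Decidable (Spec_pattern5 N out) := by unfold Spec_pattern5; infer_instance

-- ===== CLAIM (what is proved, stated in full; the proofs are below) =====
def Claim_equal_pattern5 : Prop := ∀ (N : Int), Dom_pattern5 N → Spec_pattern5 N (pattern5 N)

-- ===== LEMMAS AND PROOFS =====

-- entry of a matrix (0 outside), square shape, and generic helpers
def pvE (m : List (List Int)) (r c : Nat) : Int := (m.getD r []).getD c 0
def pvSh (n : Nat) (m : List (List Int)) : Prop :=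
  m.length = n ∧ ∀ row ∈ m, row.length = n

theorem pv_getD_set {α : Type} (l : List α) (a : Nat) (v : α) (r : Nat) (d : α)
    (ha : a < l.length) :
    (l.set a v).getD r d = if r = a then v else l.getD r d := by
  rw [List.getD_eq_getElem?_getD, List.getD_eq_getElem?_getD, List.getElem?_set]
  split_ifs with h1 h2 h2
  · simp
  · omega
  · omega
  · rfl

theorem pvE_set (m : List (List Int)) (a : Nat) (v : List Int) (r c : Nat) (ha : a < m.length) :
    pvE (m.set a v) r c = if r = a then v.getD c 0 else pvE m r c := by
  unfold pvE
  rw [pv_getD_set m a v r [] ha]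
  split_ifs <;> rfl

theorem pvExt {n : ℕ} {m m' : List (List Int)} (hm : pvSh n m) (hm' : pvSh n m')
    (h : ∀ r c : Nat, r < n → c < n → pvE m r c = pvE m' r c) : m = m' := by
  obtain ⟨hl, hr⟩ := hm; obtain ⟨hl', hr'⟩ := hm'
  apply List.ext_getElem (by omega)
  intro r h1 h2
  have hrow : m[r].length = n := hr _ (List.getElem_mem _)
  have hrow' : m'[r].length = n := hr' _ (List.getElem_mem _)
  apply List.ext_getElem (by omega)
  intro c hc1 hc2
  have := h r c (by omega) (by omega)
  simpa [pvE, List.getD_eq_getElem?_getD, List.getElem?_eq_getElem, h1, h2, hc1, hc2] using this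


-- the closed-form entry value (as B computes it), indices as Nat
def pvF (N : Int) (r c : Nat) : Int :=
  if (c : Int) - r < 0 then 0
  else 1 + ((c : Int) - r) * N - PySem.Int.floordiv (((c : Int) - r) * ((c : Int) - r - 1)) 2 + r

theorem alt_spec (N : Int) (n : Nat) (hN : N = (n : Int)) :
    pvSh n (pattern5_alt N) ∧
    ∀ r c : Nat, r < n → c < n → pvE (pattern5_alt N) r c = pvF N r c := by
  subst hN
  have hlen : (PySem.List.pyRange 0 (n : Int) 1).length = n := by
    simp [PySem.List.length_pyRange_one]
  refine ⟨⟨by simp [pattern5_alt, hlen], ?_⟩, ?_⟩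
  · intro row hrow
    simp [pattern5_alt] at hrow
    obtain ⟨i, _, rfl⟩ := hrow
    simp [hlen]
  · intro r c hr hc
    unfold pvE pattern5_alt
    have hrow : (List.map (fun i =>
        (PySem.List.pyRange 0 (n:Int) 1).map (fun j =>
          let d := j - i
          if d < 0 then 0
          else 1 + d * (n:Int) - PySem.Int.floordiv (d * (d - 1)) 2 + i))
        (PySem.List.pyRange 0 (n:Int) 1)).getD r [] =
        (PySem.List.pyRange 0 (n:Int) 1).map (fun j =>
          let d := j - (r:Int)
          if d < 0 then 0
          else 1 + d * (n:Int) - PySem.Int.floordiv (d * (d - 1)) 2 + r) := by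
      rw [List.getD_eq_getElem _ _ (by simpa [hlen] using hr), List.getElem_map,
        PySem.List.getElem_pyRange_one]
      norm_num
    rw [hrow, List.getD_eq_getElem _ _ (by simpa [hlen] using hc), List.getElem_map,
      PySem.List.getElem_pyRange_one]
    simp only [pvF]
    norm_num

theorem inner_spec (N : Int) (n : Nat) (hN : N = (n : Int)) (f : Nat) :
    ∀ (i j cnt : Int) (ret : List (List Int)), (N - i).toNat ≤ f → 0 ≤ i → i ≤ j → pvSh n ret →
    (pattern5_inner N i j cnt ret).2 = cnt + max 0 (N - j) ∧
    pvSh n (pattern5_inner N i j cnt ret).1 ∧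
    ∀ r c : Nat, r < n → c < n →
      pvE (pattern5_inner N i j cnt ret).1 r c =
        if i ≤ (r : Int) ∧ (c : Int) = (r : Int) + (j - i) then cnt + ((r : Int) - i)
        else pvE ret r c := by
  induction f with
  | zero =>
    intro i j cnt ret hf hi hij hsh
    have hni : ¬ (i < N ∧ j < N) := by omega
    rw [pattern5_inner, dif_neg hni]
    refine ⟨by omega, hsh, ?_⟩
    intro r c hr hc
    rw [if_neg]
    rintro ⟨h1, h2⟩
    omega
  | succ f ih =>
    intro i j cnt ret hf hi hij hsh
    by_cases h : i < N ∧ j < N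
    · rw [pattern5_inner, dif_pos h]
      obtain ⟨hlen, hrows⟩ := hsh
      have hit : i.toNat < ret.length := by omega
      have hrowlen : (PySem.List.pyGetD ret i []).length = n := by
        rw [PySem.List.pyGetD_eq_getElem ret [] hi (by omega)]
        exact hrows _ (List.getElem_mem _)
      have hjt : j.toNat < (PySem.List.pyGetD ret i []).length := by omega
      set row' := PySem.List.pySetD (PySem.List.pyGetD ret i []) j cnt with hrow'
      have hrow'eq : row' = (PySem.List.pyGetD ret i []).set j.toNat cnt := by
        rw [hrow', PySem.List.pySetD_of_nonneg _ _ (by omega)]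
      have hset : PySem.List.pySetD ret i row' = ret.set i.toNat row' := by
        rw [PySem.List.pySetD_of_nonneg _ _ hi]
      rw [hset]
      have hsh' : pvSh n (ret.set i.toNat row') := by
        refine ⟨by simpa using hlen, ?_⟩
        intro r hr
        rcases List.mem_or_eq_of_mem_set hr with h' | rfl
        · exact hrows _ h'
        · rw [hrow'eq, List.length_set]; exact hrowlen
      obtain ⟨ih2, ihsh, ihE⟩ := ih (i+1) (j+1) (cnt+1) (ret.set i.toNat row')
        (by omega) (by omega) (by omega) hsh'
      refine ⟨by rw [ih2]; omega, ihsh, ?_⟩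
      intro r c hr hc
      rw [ihE r c hr hc]
      have hEset : pvE (ret.set i.toNat row') r c =
          if r = i.toNat then row'.getD c 0 else pvE ret r c := pvE_set ret i.toNat row' r c hit
      have hpg : PySem.List.pyGetD ret i [] = ret.getD i.toNat [] := by
        rw [PySem.List.pyGetD_eq_getElem ret [] hi (by omega), List.getD_eq_getElem _ _ hit]
      by_cases hA : i + 1 ≤ (r:Int) ∧ (c:Int) = (r:Int) + (j + 1 - (i + 1))
      · rw [if_pos hA, if_pos (show i ≤ (r:Int) ∧ (c:Int) = (r:Int) + (j - i) by omega)]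
        omega
      · rw [if_neg hA, hEset]
        by_cases hri : r = i.toNat
        · subst hri
          rw [hrow'eq, pv_getD_set _ _ _ _ _ hjt, hpg]
          unfold pvE
          split_ifs with h1 h2 h2 <;> first | rfl | omega
        · rw [if_neg hri, if_neg (by omega)]
    · rw [pattern5_inner, dif_neg h]
      refine ⟨by omega, hsh, ?_⟩
      intro r c hr hc
      rw [if_neg]
      rintro ⟨h1, h2⟩
      omega

def pvBase (N x : Int) : Int := 1 + x * N - PySem.Int.floordiv (x * (x - 1)) 2

theorem pvBase_step (N x : Int) : pvBase N x + (N - x) = pvBase N (x + 1) := by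
  unfold pvBase
  rw [PySem.Int.floordiv_eq_ediv_of_pos (by norm_num), PySem.Int.floordiv_eq_ediv_of_pos (by norm_num)]
  have h1 : (x + 1) * (x + 1 - 1) = x * (x - 1) + x * 2 := by ring
  rw [h1, Int.add_mul_ediv_right _ _ (by norm_num)]
  ring

def pvOuter (N : Int) (k : Int) : List (List Int) × Int × Int :=
  (PySem.List.pyRange 0 k 1).foldl
    (fun (acc : List (List Int) × Int × Int) _ =>
      let ret := acc.1
      let cnt := acc.2.1
      let st := acc.2.2
      let p := pattern5_inner N 0 st cnt ret
      (p.1, p.2, st + 1))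
    ((PySem.List.pyRange 0 N 1).map (fun _ => List.replicate N.toNat (0 : Int)), 1, 0)

theorem pattern5_eq_pvOuter (N : Int) : pattern5 N = (pvOuter N N).1 := rfl

theorem outer_spec (N : Int) (n : Nat) (hN : N = (n : Int)) :
    ∀ k : Nat, k ≤ n →
    (pvOuter N k).2.1 = pvBase N k ∧ (pvOuter N k).2.2 = (k : Int) ∧ pvSh n (pvOuter N k).1 ∧
    ∀ r c : Nat, r < n → c < n →
      pvE (pvOuter N k).1 r c = if (r : Int) ≤ c ∧ (c : Int) - r < k then pvF N r c else 0 := by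
  intro k
  induction k with
  | zero =>
    intro _
    unfold pvOuter
    simp only [Nat.cast_zero]
    rw [PySem.List.pyRange_one_eq_nil (by omega : (0:Int) ≤ 0), List.foldl_nil]
    refine ⟨?_, by norm_num, ⟨?_, ?_⟩, ?_⟩
    · norm_num [pvBase, PySem.Int.floordiv_eq_ediv_of_pos (show (0:Int) < 2 by norm_num)]
    · simp [PySem.List.length_pyRange_one]; omega
    · intro row hrow
      simp only [List.mem_map] at hrow
      obtain ⟨_, _, rfl⟩ := hrow
      simp; omega
    · intro r c hr hc
      rw [if_neg (by omega)]
      have hrl : r < ((PySem.List.pyRange 0 N 1).map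
          (fun _ => List.replicate N.toNat (0 : Int))).length := by
        simp [PySem.List.length_pyRange_one]; omega
      unfold pvE
      rw [List.getD_eq_getElem _ _ hrl, List.getElem_map]
      simp
  | succ k ih =>
    intro hk1
    obtain ⟨hcnt, hst, hsh, hE⟩ := ih (by omega)
    have hsplit : pvOuter N ((k+1 : Nat) : Int) =
        (fun (acc : List (List Int) × Int × Int) _ =>
          let ret := acc.1
          let cnt := acc.2.1
          let st := acc.2.2
          let p := pattern5_inner N 0 st cnt ret
          (p.1, p.2, st + 1)) (pvOuter N k) (k : Int) := by
      unfold pvOuter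
      have : ((k+1 : Nat) : Int) = (k : Int) + 1 := by push_cast; ring
      rw [this, PySem.List.pyRange_one_succ_right (by omega), List.foldl_append,
        List.foldl_cons, List.foldl_nil]
    rw [hsplit]
    simp only [hcnt, hst]
    obtain ⟨i2, ish, iE⟩ := inner_spec N n hN (N - 0).toNat 0 (k : Int) (pvBase N k)
      (pvOuter N k).1 (by omega) (by omega) (by omega) hsh
    refine ⟨?_, by push_cast; ring, ish, ?_⟩
    · show (pattern5_inner N 0 (k : Int) (pvBase N k) (pvOuter N k).1).2 = pvBase N ((k+1:Nat) : Int)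
      rw [i2, max_eq_right (by omega : (0:Int) ≤ N - k)]
      have := pvBase_step N (k : Int)
      push_cast
      linarith
    · intro r c hr hc
      show pvE (pattern5_inner N 0 (k : Int) (pvBase N k) (pvOuter N k).1).1 r c = _
      rw [iE r c hr hc]
      by_cases hd : (c : Int) = (r : Int) + ((k : Int) - 0)
      · rw [if_pos ⟨by omega, hd⟩, if_pos (by constructor <;> push_cast <;> omega)]
        have hcr : (c : Int) - r = (k : Int) := by omega
        unfold pvF pvBase
        rw [if_neg (by omega), hcr]
        ring
      · rw [if_neg (by rintro ⟨h1, h2⟩; exact hd h2), hE r c hr hc]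
        split_ifs with h1 h2 h2 <;> first | rfl | (exfalso; push_cast at h1 h2 ⊢; omega)

theorem pattern5_final (N : Int) : pattern5 N = pattern5_alt N := by
  by_cases hN : N ≤ 0
  · rw [pattern5_eq_pvOuter]
    unfold pvOuter pattern5_alt
    rw [PySem.List.pyRange_one_eq_nil (by omega), List.foldl_nil, List.map_nil]
    rfl
  · obtain ⟨n, rfl⟩ : ∃ n : ℕ, N = (n : Int) := ⟨N.toNat, by omega⟩
    obtain ⟨hcnt, hst, hsh, hE⟩ := outer_spec _ n rfl n le_rfl
    obtain ⟨ash, aE⟩ := alt_spec _ n rfl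
    rw [pattern5_eq_pvOuter]
    apply pvExt hsh ash
    intro r c hr hc
    rw [hE r c hr hc, aE r c hr hc]
    by_cases hrc : (r : Int) ≤ c
    · rw [if_pos ⟨hrc, by omega⟩]
    · rw [if_neg (by omega)]
      unfold pvF
      rw [if_pos (by omega)]

-- ===== VERDICT (by name: the statement is the Claim_ definition above) =====
theorem pattern5_spec : Claim_equal_pattern5 := by
  intro N _
  show pattern5 N = pattern5_alt N
  exact pattern5_final N
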